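-- pv_equiv track=rewrite | github.com/msananeva/python_algorithms | Amazon/Az_OddVsEven.py | odd_vs_even
-- ===== SOURCE A (Python) =====
-- def odd_vs_even(nums):
--     odd = []
--     even = []
--     for num in nums:
--         if num == 0:
--             continue
--         elif num % 2 == 0 and num not in even:
--             even.append(num)
--         elif num % 2 != 0 and num not in odd:
--             odd.append(num)
--     return f"Odd nums are: {odd}, Even nums are: {even}"
-- ===== SOURCE B (Python) =====
-- def odd_vs_even(nums):
--     odd = []
--     even = []
--     for n in reversed(nums):
--         if n == 0:
--             continue
--         if n % 2 == 0:
--             even = [n] + [x for x in even if x != n]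
--         else:
--             odd = [n] + [x for x in odd if x != n]
--     return f"Odd nums are: {odd}, Even nums are: {even}"
-- ===== Notes on version B (the rewrite author's own statement) =====
-- stated objective: alternative
-- what changed: A scans forward keeping the first occurrence via 'num not in even/odd' membership tests; B traverses the list BACKWARD with no membership test at all, prepending each nonzero number and deleting any later duplicate from the already-built list (dedup by deletion instead of dedup by seen-check).
import Mathlib
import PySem

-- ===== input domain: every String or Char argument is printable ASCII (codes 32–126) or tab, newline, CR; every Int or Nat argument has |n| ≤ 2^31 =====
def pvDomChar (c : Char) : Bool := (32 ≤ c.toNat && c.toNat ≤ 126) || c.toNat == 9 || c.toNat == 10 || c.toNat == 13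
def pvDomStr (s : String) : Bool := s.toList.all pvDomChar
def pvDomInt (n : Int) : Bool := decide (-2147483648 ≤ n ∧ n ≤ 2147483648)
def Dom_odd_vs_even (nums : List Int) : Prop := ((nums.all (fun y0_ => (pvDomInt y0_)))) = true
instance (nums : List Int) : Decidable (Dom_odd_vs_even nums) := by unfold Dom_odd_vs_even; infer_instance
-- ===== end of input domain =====

-- B replaces A's forward loop with 'not in' membership dedup by a BACKWARD
-- traversal that prepends each nonzero number and deletes later duplicates
-- from the list built so far (objective: alternative; same cost).

-- ===== PORT A =====
-- shared f-string rendering of a Python list of ints: "[a, b, c]"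
def pyReprIntList (l : List Int) : String :=
  "[" ++ String.intercalate ", " (l.map PySem.Int.toStr) ++ "]"

-- A's for-loop over nums mutating (odd, even)
def odd_vs_even_loop : List Int → List Int → List Int → List Int × List Int
  | [], odd, even => (odd, even)
  | num :: rest, odd, even =>
    if num = 0 then odd_vs_even_loop rest odd even
    else if PySem.Int.mod num 2 = 0 ∧ num ∉ even then odd_vs_even_loop rest odd (even ++ [num])
    else if PySem.Int.mod num 2 ≠ 0 ∧ num ∉ odd then odd_vs_even_loop rest (odd ++ [num]) even
    else odd_vs_even_loop rest odd even

def odd_vs_even (nums : List Int) : String :=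
  let st := odd_vs_even_loop nums [] []
  "Odd nums are: " ++ pyReprIntList st.1 ++ ", Even nums are: " ++ pyReprIntList st.2

-- ===== PORT B =====
-- B's loop body: state (odd, even); for n in reversed(nums)
def odd_vs_even_alt_step (st : List Int × List Int) (n : Int) : List Int × List Int :=
  if n = 0 then st
  else if PySem.Int.mod n 2 = 0 then (st.1, n :: st.2.filter (fun x => decide (x ≠ n)))
  else (n :: st.1.filter (fun x => decide (x ≠ n)), st.2)

def odd_vs_even_alt (nums : List Int) : String :=
  let st := (nums.reverse).foldl odd_vs_even_alt_step ([], [])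
  "Odd nums are: " ++ pyReprIntList st.1 ++ ", Even nums are: " ++ pyReprIntList st.2

-- ===== PRECONDITION & SPEC =====
def Spec_odd_vs_even (nums : List Int) (out : String) : Prop := out = odd_vs_even_alt nums
instance (nums : List Int) (out : String) : Decidable (Spec_odd_vs_even nums out) := by unfold Spec_odd_vs_even; infer_instance

-- ===== CLAIM (what is proved, stated in full; the proofs are below) =====
def Claim_equal_odd_vs_even : Prop := ∀ (nums : List Int), Dom_odd_vs_even nums → Spec_odd_vs_even nums (odd_vs_even nums)

-- ===== LEMMAS AND PROOFS =====

-- first-occurrence dedup of ns relative to an already-seen list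
def ddSeen : List Int → List Int → List Int
  | _, [] => []
  | seen, n :: ns => if n ∈ seen then ddSeen seen ns else n :: ddSeen (n :: seen) ns

theorem ddSeen_congr (ns : List Int) : ∀ s s' : List Int,
    (∀ x : Int, x ∈ s ↔ x ∈ s') → ddSeen s ns = ddSeen s' ns := by
  induction ns with
  | nil => intro s s' _; rfl
  | cons n ns ih =>
    intro s s' h
    simp only [ddSeen]
    by_cases hn : n ∈ s
    · rw [if_pos hn, if_pos ((h n).mp hn)]; exact ih s s' h
    · rw [if_neg hn, if_neg (fun hx => hn ((h n).mpr hx))]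
      have := ih (n :: s) (n :: s') (by intro x; simp [h x])
      rw [this]

theorem filter_ddSeen_congr (q : Int → Bool) (hq : q 0 = false) (ns : List Int) :
    ∀ s s' : List Int, (∀ x : Int, x ≠ 0 → (x ∈ s ↔ x ∈ s')) →
    (ddSeen s ns).filter q = (ddSeen s' ns).filter q := by
  induction ns with
  | nil => intro s s' _; rfl
  | cons n ns ih =>
    intro s s' h
    by_cases h0 : n = 0
    · subst h0
      simp only [ddSeen]
      have step : ∀ t t' : List Int, (∀ x : Int, x ≠ 0 → (x ∈ t ↔ x ∈ t')) →
          (if (0:Int) ∈ t then ddSeen t ns else (0:Int) :: ddSeen ((0:Int) :: t) ns).filter q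
            = (ddSeen t' ns).filter q := by
        intro t t' ht
        by_cases hz : (0:Int) ∈ t
        · rw [if_pos hz]; exact ih t t' ht
        · rw [if_neg hz, List.filter_cons_of_neg (by simp [hq])]
          exact ih ((0:Int) :: t) t' (by intro x hx; simp [List.mem_cons, hx, ht x hx])
      calc (if (0:Int) ∈ s then ddSeen s ns else (0:Int) :: ddSeen ((0:Int) :: s) ns).filter q
          = (ddSeen s' ns).filter q := step s s' h
        _ = (if (0:Int) ∈ s' then ddSeen s' ns else (0:Int) :: ddSeen ((0:Int) :: s') ns).filter q := by
            by_cases hz : (0:Int) ∈ s'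
            · rw [if_pos hz]
            · rw [if_neg hz, List.filter_cons_of_neg (by simp [hq])]
              exact ih s' ((0:Int) :: s') (by intro x hx; simp [List.mem_cons, hx])
    · simp only [ddSeen]
      by_cases hn : n ∈ s
      · rw [if_pos hn, if_pos ((h n h0).mp hn)]; exact ih s s' h
      · rw [if_neg hn, if_neg (fun hx => hn ((h n h0).mpr hx))]
        by_cases hqn : q n
        · rw [List.filter_cons_of_pos hqn, List.filter_cons_of_pos hqn]
          have := ih (n :: s) (n :: s') (by intro x hx; simp [List.mem_cons, h x hx])
          rw [this]
        · rw [List.filter_cons_of_neg (by simp [hqn]), List.filter_cons_of_neg (by simp [hqn])]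
          exact ih (n :: s) (n :: s') (by intro x hx; simp [List.mem_cons, h x hx])

def qOdd : Int → Bool := fun n => decide (n ≠ 0) && decide (PySem.Int.mod n 2 ≠ 0)
def qEven : Int → Bool := fun n => decide (n ≠ 0) && decide (PySem.Int.mod n 2 = 0)

theorem loop_eq_ddSeen (ns : List Int) : ∀ o e : List Int,
    (∀ x ∈ o, x ≠ 0 ∧ PySem.Int.mod x 2 ≠ 0) →
    (∀ x ∈ e, x ≠ 0 ∧ PySem.Int.mod x 2 = 0) →
    odd_vs_even_loop ns o e =
      (o ++ (ddSeen (o ++ e) ns).filter qOdd, e ++ (ddSeen (o ++ e) ns).filter qEven) := by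
  induction ns with
  | nil => intro o e _ _; simp [odd_vs_even_loop, ddSeen]
  | cons n ns ih =>
    intro o e ho he
    have hnotmem0 : (0:Int) ∉ o ++ e := by
      intro hx
      rcases List.mem_append.mp hx with hx | hx
      · exact (ho 0 hx).1 rfl
      · exact (he 0 hx).1 rfl
    by_cases h0 : n = 0
    · subst h0
      have hstep : odd_vs_even_loop (0 :: ns) o e = odd_vs_even_loop ns o e := by
        simp [odd_vs_even_loop]
      rw [hstep, ih o e ho he]
      have fo := filter_ddSeen_congr qOdd (by decide) ns ((0:Int) :: (o ++ e)) (o ++ e)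
        (by intro x hx; simp [List.mem_cons, hx])
      have fe := filter_ddSeen_congr qEven (by decide) ns ((0:Int) :: (o ++ e)) (o ++ e)
        (by intro x hx; simp [List.mem_cons, hx])
      simp only [ddSeen, if_neg hnotmem0]
      rw [List.filter_cons_of_neg (by decide), List.filter_cons_of_neg (by decide), fo, fe]
    · by_cases hpar : PySem.Int.mod n 2 = 0
      · -- even n ; n ∈ o impossible
        have hno : n ∉ o := fun hx => (ho n hx).2 hpar
        by_cases hne : n ∈ e
        · -- skip: already in even
          have hmem : n ∈ o ++ e := List.mem_append.mpr (Or.inr hne)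
          simp only [odd_vs_even_loop, if_neg h0]
          rw [if_neg (fun hc => hc.2 hne), if_neg (fun hc => hc.1 hpar)]
          rw [ih o e ho he]
          simp only [ddSeen, if_pos hmem]
        · have hmem : n ∉ o ++ e := by simp [List.mem_append, hno, hne]
          simp only [odd_vs_even_loop, if_neg h0]
          rw [if_pos ⟨hpar, hne⟩]
          rw [ih o (e ++ [n]) ho (by
            intro x hx
            rcases List.mem_append.mp hx with hx | hx
            · exact he x hx
            · simp at hx; subst hx; exact ⟨h0, hpar⟩)]
          simp only [ddSeen, if_neg hmem]
          have hqo : qOdd n = false := by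
            unfold qOdd; rw [decide_eq_false (not_not_intro hpar), Bool.and_false]
          have hqe : qEven n = true := by
            unfold qEven; rw [decide_eq_true h0, decide_eq_true hpar]; rfl
          rw [List.filter_cons_of_neg (by simp [hqo]), List.filter_cons_of_pos hqe]
          have congrKey : ∀ q : Int → Bool,
              (ddSeen (o ++ (e ++ [n])) ns).filter q = (ddSeen (n :: (o ++ e)) ns).filter q := by
            intro q
            rw [ddSeen_congr ns (o ++ (e ++ [n])) (n :: (o ++ e))
              (by intro x; simp [List.mem_append, List.mem_cons]; tauto)]
          rw [congrKey qOdd, congrKey qEven]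
          simp only [List.append_assoc, List.singleton_append]
      · -- odd n ; n ∈ e impossible
        have hne : n ∉ e := fun hx => hpar (he n hx).2
        by_cases hno : n ∈ o
        · have hmem : n ∈ o ++ e := List.mem_append.mpr (Or.inl hno)
          simp only [odd_vs_even_loop, if_neg h0]
          rw [if_neg (fun hc => hpar hc.1), if_neg (fun hc => hc.2 hno)]
          rw [ih o e ho he]
          simp only [ddSeen, if_pos hmem]
        · have hmem : n ∉ o ++ e := by simp [List.mem_append, hno, hne]
          simp only [odd_vs_even_loop, if_neg h0]
          rw [if_neg (fun hc => hpar hc.1), if_pos ⟨hpar, hno⟩]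
          rw [ih (o ++ [n]) e (by
            intro x hx
            rcases List.mem_append.mp hx with hx | hx
            · exact ho x hx
            · simp at hx; subst hx; exact ⟨h0, hpar⟩) he]
          simp only [ddSeen, if_neg hmem]
          have hqo : qOdd n = true := by
            unfold qOdd; rw [decide_eq_true h0, decide_eq_true hpar]; rfl
          have hqe : qEven n = false := by
            unfold qEven; rw [decide_eq_false hpar, Bool.and_false]
          rw [List.filter_cons_of_pos hqo, List.filter_cons_of_neg (by simp [hqe])]
          have congrKey : ∀ q : Int → Bool,
              (ddSeen ((o ++ [n]) ++ e) ns).filter q = (ddSeen (n :: (o ++ e)) ns).filter q := by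
            intro q
            rw [ddSeen_congr ns ((o ++ [n]) ++ e) (n :: (o ++ e))
              (by intro x; simp [List.mem_append, List.mem_cons]; tauto)]
          rw [congrKey qOdd, congrKey qEven]
          simp only [List.append_assoc, List.singleton_append]

-- seeding the seen-list with a deletes a from the dedup result
theorem ddSeen_cons_seen (ns : List Int) : ∀ (a : Int) (s : List Int),
    ddSeen (a :: s) ns = (ddSeen s ns).filter (fun x => decide (x ≠ a)) := by
  induction ns with
  | nil => intro a s; rfl
  | cons n ns ih =>
    intro a s
    simp only [ddSeen]
    by_cases hn : n ∈ a :: s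
    · rcases List.mem_cons.mp hn with h | h
      · subst h
        by_cases hs : n ∈ s
        · rw [if_pos (List.mem_cons_self), if_pos hs, ih n s]
        · rw [if_pos List.mem_cons_self, if_neg hs,
            List.filter_cons_of_neg (by simp), ih n s]
          simp [List.filter_filter]
      · rw [if_pos (List.mem_cons_of_mem a h), if_pos h]
        exact ih a s
    · have hna : n ≠ a := fun h => hn (h ▸ List.mem_cons_self)
      have hns : n ∉ s := fun h => hn (List.mem_cons_of_mem a h)
      rw [if_neg hn, if_neg hns, List.filter_cons_of_pos (by simp [hna])]
      have : ddSeen (n :: a :: s) ns = ddSeen (a :: n :: s) ns :=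
        ddSeen_congr ns _ _ (by intro x; simp [List.mem_cons]; tauto)
      rw [this, ih a (n :: s), ih n s]
  
-- filters commute
theorem filter_comm_int (p q : Int → Bool) (l : List Int) :
    (l.filter p).filter q = (l.filter q).filter p := by
  induction l with
  | nil => rfl
  | cons x xs ih =>
    by_cases hp : p x <;> by_cases hq : q x <;>
      simp [List.filter, hp, hq, ih]

-- B's backward fold computes the same two filtered dedup lists
theorem alt_fold_eq_ddSeen (ns : List Int) :
    ns.foldr (fun n st => odd_vs_even_alt_step st n) ([], []) =
      ((ddSeen [] ns).filter qOdd, (ddSeen [] ns).filter qEven) := by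
  induction ns with
  | nil => rfl
  | cons n ns ih =>
    simp only [List.foldr, ih]
    have hdd : ddSeen [] (n :: ns) = n :: ddSeen [n] ns := by
      simp [ddSeen]
    have hdel : ddSeen [n] ns = (ddSeen [] ns).filter (fun x => decide (x ≠ n)) :=
      ddSeen_cons_seen ns n []
    by_cases h0 : n = 0
    · subst h0
      have hq : ∀ q : Int → Bool, (∀ x, q x = true → x ≠ 0) →
          (ddSeen [] ((0:Int) :: ns)).filter q = (ddSeen [] ns).filter q := by
        intro q hq0
        rw [hdd, List.filter_cons_of_neg (by
            cases hqq : q 0 with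
            | false => simp
            | true => exact absurd rfl (hq0 0 hqq)), hdel, filter_comm_int]
        exact List.filter_eq_self.mpr (fun x hx => by
          have := hq0 x (List.of_mem_filter hx)
          simp [this])
      unfold odd_vs_even_alt_step
      rw [if_pos rfl]
      refine Prod.ext ?_ ?_ <;> simp only
      · rw [hq qOdd (fun x hx => by simpa [qOdd] using (by
          unfold qOdd at hx; exact of_decide_eq_true (Bool.and_elim_left hx)))]
      · rw [hq qEven (fun x hx => by
          unfold qEven at hx; exact of_decide_eq_true (Bool.and_elim_left hx))]
    · have drop_irrelevant : ∀ q : Int → Bool, q n = false → (∀ x, q x = true → x ≠ n) →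
          (ddSeen [] (n :: ns)).filter q = (ddSeen [] ns).filter q := by
        intro q hqn hx
        rw [hdd, List.filter_cons_of_neg (by simp [hqn]), hdel, filter_comm_int]
        exact List.filter_eq_self.mpr (fun x hmem => by
          have := hx x (List.of_mem_filter hmem)
          simp [this])
      by_cases hpar : PySem.Int.mod n 2 = 0
      · have hqe : qEven n = true := by
          unfold qEven; rw [decide_eq_true h0, decide_eq_true hpar]; rfl
        have hqo : qOdd n = false := by
          unfold qOdd; rw [decide_eq_false (not_not_intro hpar), Bool.and_false]
        unfold odd_vs_even_alt_step
        rw [if_neg h0, if_pos hpar]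
        refine Prod.ext ?_ ?_ <;> simp only
        · rw [drop_irrelevant qOdd hqo (fun x hx h => by
            unfold qOdd at hx
            exact of_decide_eq_true (Bool.and_elim_right hx) (h ▸ hpar))]
        · rw [hdd, List.filter_cons_of_pos hqe, hdel, filter_comm_int]
      · have hqe : qEven n = false := by
          unfold qEven; rw [decide_eq_false hpar, Bool.and_false]
        have hqo : qOdd n = true := by
          unfold qOdd; rw [decide_eq_true h0, decide_eq_true hpar]; rfl
        unfold odd_vs_even_alt_step
        rw [if_neg h0, if_neg hpar]
        refine Prod.ext ?_ ?_ <;> simp only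
        · rw [hdd, List.filter_cons_of_pos hqo, hdel, filter_comm_int]
        · rw [drop_irrelevant qEven hqe (fun x hx h => by
            unfold qEven at hx
            exact hpar (h ▸ of_decide_eq_true (Bool.and_elim_right hx)))]

-- ===== VERDICT (by name: the statement is the Claim_ definition above) =====
theorem odd_vs_even_spec : Claim_equal_odd_vs_even := by
  intro nums _
  unfold Spec_odd_vs_even odd_vs_even odd_vs_even_alt
  rw [List.foldl_reverse, alt_fold_eq_ddSeen, loop_eq_ddSeen nums [] [] (by simp) (by simp)]
  rfl
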